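-- pv_equiv track=rewrite | github.com/Ravi-0412/DSA-Program-And-Notes | Graph/Indegree Topological order/Remove Leaf To Nodes.py | is_valid_peeling
-- ===== SOURCE A (Python) =====
-- from collections import deque, defaultdict
-- from collections import defaultdict
--
-- def is_valid_peeling(n, edges, sequence):
--     # 1. Basic length check
--     if len(sequence) != n:
--         return False
--     if n == 1:
--         return sequence == [0]
--
--     # 2. Build Adjacency List and initial Degrees
--     adj = defaultdict(list)
--     degree = [0] * n
--     for u, v in edges:
--         adj[u].append(v)
--         adj[v].append(u)
--         degree[u] += 1
--         degree[v] += 1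
--
--     # 3. Track removed nodes to avoid processing the same edge twice
--     removed = [False] * n
--
--     # 4. Simulate the sequence
--     for node in sequence:
--         # A node must be a leaf (degree 0 or 1) at the time of removal
--         if degree[node] > 1:
--             return False # Logic: It's still a hub, not a leaf
--
--         removed[node] = True
--
--         # "Remove" the node and update neighbors
--         for neighbor in adj[node]:
--             if not removed[neighbor]:
--                 degree[neighbor] -= 1
--
--     return True
-- ===== SOURCE B (Python) =====
-- def is_valid_peeling(n, edges, sequence):
--     if len(sequence) != n:
--         return False
--     if n == 1:
--         return sequence == [0]
--     # Offline judgement: map each node to its removal position, then charge each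
--     # edge once to its earlier-removed endpoint (a self-loop charges 2).  A
--     # position is validly removable iff it is charged at most once.
--     pos = {node: i for i, node in enumerate(sequence)}
--     cnt = [0] * n
--     for u, v in edges:
--         if u == v:
--             cnt[pos[u]] += 2
--         elif pos[u] < pos[v]:
--             cnt[pos[u]] += 1
--         else:
--             cnt[pos[v]] += 1
--     return all(c <= 1 for c in cnt)
-- ===== Notes on version B (the rewrite author's own statement) =====
-- stated objective: alternative
-- what changed: Replaces A's stateful peeling simulation (adjacency lists, mutable degree and removed arrays, per-step neighbour decrements) by an offline single pass over the edges that charges each edge to its earlier-removed endpoint via a precomputed position map, then checks every position is charged at most once.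
-- outside the precondition, e.g. on is_valid_peeling(2, [(0, 5)], [0, 1]): A raises IndexError, B raises KeyError; on is_valid_peeling(3, [(0, 1), (1, 2)], [-1, 1, 0]): A returns False, B raises KeyError; on is_valid_peeling(2, [(0, 1)], [0, 0]): A returns True, B raises KeyError
import Mathlib
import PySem

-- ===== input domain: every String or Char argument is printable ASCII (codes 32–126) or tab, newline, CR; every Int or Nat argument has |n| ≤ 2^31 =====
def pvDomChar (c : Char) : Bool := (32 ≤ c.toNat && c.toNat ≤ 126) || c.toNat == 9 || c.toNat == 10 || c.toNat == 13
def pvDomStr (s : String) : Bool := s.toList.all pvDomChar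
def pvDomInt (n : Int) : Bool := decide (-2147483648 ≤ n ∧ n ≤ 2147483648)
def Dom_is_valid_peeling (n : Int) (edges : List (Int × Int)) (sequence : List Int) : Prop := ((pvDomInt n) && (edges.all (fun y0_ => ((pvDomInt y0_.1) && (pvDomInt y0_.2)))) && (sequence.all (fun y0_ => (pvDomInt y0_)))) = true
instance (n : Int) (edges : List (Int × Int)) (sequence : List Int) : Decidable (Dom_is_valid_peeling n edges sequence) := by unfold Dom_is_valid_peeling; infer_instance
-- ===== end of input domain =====

-- B replaces A's stateful removed/degree simulation by an offline charge of each edge to its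
-- earlier-removed endpoint over a precomputed position map (objective: alternative, same cost).

-- ===== PORT A =====
def is_valid_peeling (n : Int) (edges : List (Int × Int)) (sequence : List Int) : Bool :=
  if (sequence.length : Int) ≠ n then false
  else if n = 1 then sequence == [0]
  else
    -- adjacency dict and degree array built in one pass over edges (degree[v] += 1 reads after degree[u] += 1)
    let ad := edges.foldl
      (fun (st : PySem.Dict Int (List Int) × List Int) uv =>
        ((st.1.modify uv.1 [] (· ++ [uv.2])).modify uv.2 [] (· ++ [uv.1]),
         let d1 := PySem.List.pySetD st.2 uv.1 (PySem.List.pyGetD st.2 uv.1 0 + 1)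
         PySem.List.pySetD d1 uv.2 (PySem.List.pyGetD d1 uv.2 0 + 1)))
      (PySem.Dict.empty, List.replicate n.toNat 0)
    -- simulate the sequence; state none = 'returned False'
    let res := sequence.foldl
      (fun (st : Option (List Bool × List Int)) node =>
        match st with
        | none => none
        | some (removed, degree) =>
          if 1 < PySem.List.pyGetD degree node 0 then none
          else
            let removed' := PySem.List.pySetD removed node true
            let degree' := (ad.1.getD node []).foldl
              (fun dg nb =>
                if PySem.List.pyGetD removed' nb false then dg
                else PySem.List.pySetD dg nb (PySem.List.pyGetD dg nb 0 - 1)) degree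
            some (removed', degree'))
      (some (List.replicate n.toNat false, ad.2))
    res.isSome

-- ===== PORT B =====
def is_valid_peeling_alt (n : Int) (edges : List (Int × Int)) (sequence : List Int) : Bool :=
  if (sequence.length : Int) ≠ n then false
  else if n = 1 then sequence == [0]
  else
    -- pos = {node: i for i, node in enumerate(sequence)}
    let pos := (PySem.List.enumerate sequence 0).foldl
      (fun (d : PySem.Dict Int Int) p => d.insert p.2 p.1) PySem.Dict.empty
    -- pos[u]: a KeyError (label absent from sequence) is outside Pre_, where getD's default is never read
    let cnt := edges.foldl
      (fun c uv =>
        if uv.1 = uv.2 then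
          PySem.List.pySetD c (pos.getD uv.1 0) (PySem.List.pyGetD c (pos.getD uv.1 0) 0 + 2)
        else if pos.getD uv.1 0 < pos.getD uv.2 0 then
          PySem.List.pySetD c (pos.getD uv.1 0) (PySem.List.pyGetD c (pos.getD uv.1 0) 0 + 1)
        else
          PySem.List.pySetD c (pos.getD uv.2 0) (PySem.List.pyGetD c (pos.getD uv.2 0) 0 + 1))
      (List.replicate n.toNat (0 : Int))
    cnt.all (fun c => c ≤ 1)

-- ===== PRECONDITION & SPEC =====
-- Pre_ excludes, when the simulation actually runs (len(sequence) == n and n != 1): node labels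
-- outside [0, n) — labels ≥ n or < -n make A raise IndexError, and in-range negative labels hit
-- A's accidental mix of wrapping list indices with non-wrapping adjacency-dict keys — and repeated
-- labels in sequence, on which A's double-decrement of still-present neighbours is an artefact of
-- the removed-flag simulation; on these quirky inputs the natural B raises KeyError.
def Pre_is_valid_peeling (n : Int) (edges : List (Int × Int)) (sequence : List Int) : Prop :=
  (sequence.length : Int) = n → n ≠ 1 →
    (sequence.Nodup ∧ (∀ x ∈ sequence, 0 ≤ x ∧ x < n) ∧
      (∀ e ∈ edges, 0 ≤ e.1 ∧ e.1 < n ∧ 0 ≤ e.2 ∧ e.2 < n))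
instance (n : Int) (edges : List (Int × Int)) (sequence : List Int) : Decidable (Pre_is_valid_peeling n edges sequence) := by unfold Pre_is_valid_peeling; infer_instance

def pvWitness_is_valid_peeling : Int × (List (Int × Int)) × List Int := (3, [(0, 1), (1, 2)], [2, 0, 1])

def Spec_is_valid_peeling (n : Int) (edges : List (Int × Int)) (sequence : List Int) (out : Bool) : Prop := out = is_valid_peeling_alt n edges sequence
instance (n : Int) (edges : List (Int × Int)) (sequence : List Int) (out : Bool) : Decidable (Spec_is_valid_peeling n edges sequence out) := by unfold Spec_is_valid_peeling; infer_instance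

-- ===== CLAIM (what is proved, stated in full; the proofs are below) =====
def Claim_equal_is_valid_peeling : Prop := ∀ (n : Int) (edges : List (Int × Int)) (sequence : List Int), Dom_is_valid_peeling n edges sequence → Pre_is_valid_peeling n edges sequence → Spec_is_valid_peeling n edges sequence (is_valid_peeling n edges sequence)

-- ===== LEMMAS AND PROOFS =====

theorem pv_gset {α : Type} (xs : List α) (i j : Int) (v : α) (d : α)
    (hi0 : 0 ≤ i) (hil : i < (xs.length : Int)) (hj0 : 0 ≤ j) :
    PySem.List.pyGetD (PySem.List.pySetD xs i v) j d =
      if j = i then v else PySem.List.pyGetD xs j d := by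
  have hi : i.toNat < xs.length := by omega
  rw [PySem.List.pySetD_of_nonneg xs v hi0,
      show j = ((j.toNat : Nat) : Int) by omega,
      PySem.List.pyGetD_natCast, PySem.List.pyGetD_natCast]
  by_cases h : j = i
  · have h2 : j.toNat = i.toNat := by omega
    have h3 : ((j.toNat : Nat) : Int) = i := by omega
    simp [h2, List.getD, hi]
    intro h4; exfalso; omega
  · have hne : i.toNat ≠ j.toNat := by omega
    have h3 : ¬ (((j.toNat : Nat) : Int) = i) := by omega
    simp [List.getD, hne]
    intro h4; exfalso; omega

def pvAdjL (edges : List (Int × Int)) (w : Int) : List Int :=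
  edges.flatMap (fun e => (if e.1 = w then [e.2] else []) ++ (if e.2 = w then [e.1] else []))

def pvInc (edges : List (Int × Int)) (w x : Int) : Int :=
  (edges.map (fun e =>
    (if e.1 = w ∧ e.2 = x then (1 : Int) else 0) +
    (if e.2 = w ∧ e.1 = x then (1 : Int) else 0))).sum

theorem pv_adj_fold (edges : List (Int × Int)) (d : PySem.Dict Int (List Int)) :
    edges.foldl (fun (d : PySem.Dict Int (List Int)) e =>
        (d.modify e.1 [] (· ++ [e.2])).modify e.2 [] (· ++ [e.1])) d
      = (edges.flatMap (fun e => [(e.1, e.2), (e.2, e.1)])).foldl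
          (fun (d : PySem.Dict Int (List Int)) p => d.modify p.1 [] (· ++ [p.2])) d := by
  induction edges generalizing d with
  | nil => rfl
  | cons e es ih => simp [List.flatMap_cons, ih]

theorem pv_adjL_eq (edges : List (Int × Int)) (w : Int) :
    ((edges.flatMap (fun e => [(e.1, e.2), (e.2, e.1)])).filter (fun p => p.1 == w)).map (·.2)
      = pvAdjL edges w := by
  induction edges with
  | nil => rfl
  | cons e es ih =>
    simp only [pvAdjL, List.flatMap_cons, List.filter_append, List.map_append] at *
    rw [ih]
    congr 1
    by_cases h1 : e.1 = w <;> by_cases h2 : e.2 = w <;> simp [h1, h2]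

theorem pv_adj_spec (edges : List (Int × Int)) (w : Int) :
    ((edges.foldl (fun (d : PySem.Dict Int (List Int)) e =>
        (d.modify e.1 [] (· ++ [e.2])).modify e.2 [] (· ++ [e.1])) PySem.Dict.empty).getD w [])
      = pvAdjL edges w := by
  rw [pv_adj_fold, PySem.Dict.getD_foldl_modify_append, pv_adjL_eq]
  simp

theorem pv_adjL_mem (edges : List (Int × Int)) (w y : Int) (hy : y ∈ pvAdjL edges w) :
    ∃ e ∈ edges, e.1 = y ∨ e.2 = y := by
  simp only [pvAdjL, List.mem_flatMap] at hy
  obtain ⟨e, he, hy⟩ := hy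
  refine ⟨e, he, ?_⟩
  rcases List.mem_append.1 hy with h | h <;> split_ifs at h <;> simp at h <;> tauto

theorem pv_adjL_count (edges : List (Int × Int)) (w x : Int) :
    ((pvAdjL edges w).count x : Int) = pvInc edges w x := by
  induction edges with
  | nil => simp [pvAdjL, pvInc]
  | cons e es ih =>
    simp only [pvAdjL, pvInc, List.flatMap_cons, List.count_append, List.map_cons, List.sum_cons] at *
    push_cast
    rw [ih]
    by_cases h1 : e.1 = w <;> by_cases h2 : e.2 = w <;>
      by_cases h3 : e.1 = x <;> by_cases h4 : e.2 = x <;> by_cases h5 : x = w <;>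
      simp [h1, h2, h3, h4, h5, List.count_cons, List.count_nil]

def pvLive (edges : List (Int × Int)) (x : Int) (P : List Int) : Int :=
  (edges.map (fun e =>
    (if e.1 = x ∧ e.2 ∉ P then (1 : Int) else 0) +
    (if e.2 = x ∧ e.1 ∉ P then (1 : Int) else 0))).sum

theorem pv_deg_len (edges : List (Int × Int)) (c : List Int) :
    (edges.foldl (fun c2 (uv : Int × Int) =>
        let d1 := PySem.List.pySetD c2 uv.1 (PySem.List.pyGetD c2 uv.1 0 + 1)
        PySem.List.pySetD d1 uv.2 (PySem.List.pyGetD d1 uv.2 0 + 1)) c).length = c.length := by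
  induction edges generalizing c with
  | nil => rfl
  | cons e es ih => simp [ih, PySem.List.length_pySetD]

theorem pv_deg_spec (edges : List (Int × Int)) (c : List Int)
    (hb : ∀ e ∈ edges, 0 ≤ e.1 ∧ e.1 < (c.length : Int) ∧ 0 ≤ e.2 ∧ e.2 < (c.length : Int))
    (x : Int) (hx0 : 0 ≤ x) :
    PySem.List.pyGetD (edges.foldl (fun c2 (uv : Int × Int) =>
        let d1 := PySem.List.pySetD c2 uv.1 (PySem.List.pyGetD c2 uv.1 0 + 1)
        PySem.List.pySetD d1 uv.2 (PySem.List.pyGetD d1 uv.2 0 + 1)) c) x 0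
      = PySem.List.pyGetD c x 0 + pvLive edges x [] := by
  induction edges generalizing c with
  | nil => simp [pvLive]
  | cons e es ih =>
    obtain ⟨h1, h2, h3, h4⟩ := hb e (by simp)
    have hlen : ∀ (i : Int) v, 0 ≤ i → i < (c.length : Int) →
        ((PySem.List.pySetD c i v).length : Int) = (c.length : Int) := by
      intro i v _ _; rw [PySem.List.length_pySetD]
    simp only [List.foldl_cons]
    rw [ih]
    · rw [pv_gset _ _ _ _ _ h3 (by rw [PySem.List.length_pySetD]; exact h4) hx0,
        pv_gset _ _ _ _ _ h1 h2 h3,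
        pv_gset _ _ _ _ _ h1 h2 hx0]
      simp only [pvLive, List.map_cons, List.sum_cons, List.not_mem_nil, not_false_iff, and_true]
      by_cases e1 : x = e.1 <;> by_cases e2 : x = e.2 <;>
        simp [e1, e2, eq_comm] <;> split_ifs <;> omega
    · intro f hf
      obtain ⟨g1, g2, g3, g4⟩ := hb f (by simp [hf])
      simp only [PySem.List.length_pySetD]
      exact ⟨g1, g2, g3, g4⟩

theorem pv_inner_len (ns : List Int) (rem : List Bool) (deg : List Int) :
    (ns.foldl (fun dg nb =>
        if PySem.List.pyGetD rem nb false then dg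
        else PySem.List.pySetD dg nb (PySem.List.pyGetD dg nb 0 - 1)) deg).length = deg.length := by
  induction ns generalizing deg with
  | nil => rfl
  | cons nb ns ih =>
    simp only [List.foldl_cons]
    split
    · exact ih deg
    · rw [ih, PySem.List.length_pySetD]

theorem pv_inner_spec (ns : List Int) (rem : List Bool) (deg : List Int)
    (hb : ∀ y ∈ ns, 0 ≤ y ∧ y < (deg.length : Int)) (x : Int) (hx0 : 0 ≤ x) :
    PySem.List.pyGetD (ns.foldl (fun dg nb =>
        if PySem.List.pyGetD rem nb false then dg
        else PySem.List.pySetD dg nb (PySem.List.pyGetD dg nb 0 - 1)) deg) x 0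
      = PySem.List.pyGetD deg x 0 -
          (if PySem.List.pyGetD rem x false then 0 else (ns.count x : Int)) := by
  induction ns generalizing deg with
  | nil => simp
  | cons nb ns ih =>
    obtain ⟨h1, h2⟩ := hb nb (by simp)
    have hbs : ∀ y ∈ ns, 0 ≤ y ∧ y < (deg.length : Int) := fun y hy => hb y (by simp [hy])
    simp only [List.foldl_cons]
    by_cases hr : PySem.List.pyGetD rem nb false
    · rw [if_pos hr, ih _ hbs]
      by_cases hx : PySem.List.pyGetD rem x false
      · simp [hx]
      · have hnx : nb ≠ x := fun h => hx (h ▸ hr)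
        simp [hx, hnx]
    · rw [if_neg hr]
      rw [ih]
      · rw [pv_gset _ _ _ _ _ h1 h2 hx0]
        by_cases hx : PySem.List.pyGetD rem x false
        · have hnx : x ≠ nb := fun h => hr (h ▸ hx)
          simp [hx, hnx]
        · by_cases hxe : x = nb
          · simp [hxe, hr]
            omega
          · have hnx2 : nb ≠ x := fun h => hxe h.symm
            simp [hx, hxe, hnx2]
      · intro y hy
        rw [PySem.List.length_pySetD]
        exact hbs y hy

theorem pv_live_step (edges : List (Int × Int)) (x w : Int) (P : List Int)
    (hxw : x ≠ w) (hwP : w ∉ P) :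
    pvLive edges x (P ++ [w]) = pvLive edges x P - pvInc edges w x := by
  induction edges with
  | nil => simp [pvLive, pvInc]
  | cons e es ih =>
    simp only [pvLive, pvInc, List.map_cons, List.sum_cons] at *
    rw [ih]
    by_cases a1 : e.1 = x <;> by_cases a2 : e.2 = x <;> by_cases b1 : e.1 = w <;>
      by_cases b2 : e.2 = w <;> by_cases c1 : e.1 ∈ P <;> by_cases c2 : e.2 ∈ P <;>
      simp [a1, a2, b1, b2, c1, c2, hxw, hwP, List.mem_append] <;> omega

theorem pv_surj (sequence : List Int) (hnd : sequence.Nodup)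
    (hb : ∀ x ∈ sequence, 0 ≤ x ∧ x < (sequence.length : Int)) :
    ∀ y : Int, 0 ≤ y → y < (sequence.length : Int) → y ∈ sequence := by
  intro y hy0 hyN
  set l := sequence.map Int.toNat with hl
  have hlnd : l.Nodup := by
    refine List.Nodup.map_on ?_ hnd
    intro a ha b hb2 hab
    have := (hb a ha).1; have := (hb b hb2).1; omega
  have hmem : ∀ a ∈ l, a ∈ Finset.range sequence.length := by
    intro a ha
    simp only [hl, List.mem_map] at ha
    obtain ⟨x, hx, rfl⟩ := ha
    have := (hb x hx).1; have := (hb x hx).2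
    simp; omega
  have hsub : l.toFinset ⊆ Finset.range sequence.length := by
    intro a ha; exact hmem a (List.mem_toFinset.1 ha)
  have hcard : l.toFinset.card = sequence.length := by
    rw [List.toFinset_card_of_nodup hlnd]; simp [hl]
  have heq : l.toFinset = Finset.range sequence.length :=
    Finset.eq_of_subset_of_card_le hsub (by simp [hcard])
  have : y.toNat ∈ l.toFinset := by
    rw [heq]; simp; omega
  rw [List.mem_toFinset, hl, List.mem_map] at this
  obtain ⟨x, hx, hxy⟩ := this
  have := (hb x hx).1
  have : x = y := by omega
  exact this ▸ hx

theorem pv_pos_spec (s : List Int) (k : Int) (d : PySem.Dict Int Int) (x : Int) (hnd : s.Nodup) :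
    ((PySem.List.enumerate s k).foldl (fun (d2 : PySem.Dict Int Int) p => d2.insert p.2 p.1) d).getD x 0
      = if x ∈ s then k + (s.idxOf x : Int) else d.getD x 0 := by
  induction s generalizing k d with
  | nil => simp [PySem.List.enumerate_nil]
  | cons a s ih =>
    obtain ⟨hna, hnds⟩ := List.nodup_cons.1 hnd
    rw [PySem.List.enumerate_cons]
    simp only [List.foldl_cons]
    rw [ih _ _ hnds]
    by_cases hxs : x ∈ s
    · have hax : a ≠ x := fun h => hna (h ▸ hxs)
      simp [hxs, List.idxOf_cons_ne _ hax, List.mem_cons]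
      ring
    · by_cases hxa : x = a
      · subst hxa
        simp [hxs, PySem.Dict.getD_insert_self, List.idxOf_cons_self]
      · have hax : a ≠ x := fun h => hxa h.symm
        simp [hxs, hxa, PySem.Dict.getD_insert_of_ne d k 0 (fun h => hxa h)]

theorem pv_mem_take (s : List Int) (y : Int) (i : Nat) (hy : y ∈ s) (_hnd : s.Nodup) :
    y ∈ s.take i ↔ s.idxOf y < i := by
  constructor
  · intro h
    have h1 : s.idxOf y = (s.take i).idxOf y := by
      conv_lhs => rw [← List.take_append_drop i s]
      rw [List.idxOf_append_of_mem h]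
    have h2 : (s.take i).idxOf y < (s.take i).length := List.idxOf_lt_length_of_mem h
    have h3 : (s.take i).length ≤ i := by simp
    omega
  · intro h
    have hlt : s.idxOf y < s.length := List.idxOf_lt_length_of_mem hy
    have hg : s[s.idxOf y]'hlt = y := List.getElem_idxOf hlt
    have : (s.take i)[s.idxOf y]'(by simp; omega) = y := by
      rw [List.getElem_take]; exact hg
    exact this ▸ List.getElem_mem _

theorem pv_cnt_len (edges : List (Int × Int)) (pos : PySem.Dict Int Int) (c : List Int) :
    (edges.foldl (fun c2 (uv : Int × Int) =>
        if uv.1 = uv.2 then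
          PySem.List.pySetD c2 (pos.getD uv.1 0) (PySem.List.pyGetD c2 (pos.getD uv.1 0) 0 + 2)
        else if pos.getD uv.1 0 < pos.getD uv.2 0 then
          PySem.List.pySetD c2 (pos.getD uv.1 0) (PySem.List.pyGetD c2 (pos.getD uv.1 0) 0 + 1)
        else
          PySem.List.pySetD c2 (pos.getD uv.2 0) (PySem.List.pyGetD c2 (pos.getD uv.2 0) 0 + 1)) c).length
      = c.length := by
  induction edges generalizing c with
  | nil => rfl
  | cons e es ih =>
    simp only [List.foldl_cons]
    split_ifs <;> rw [ih, PySem.List.length_pySetD]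

theorem pv_cnt_spec (edges : List (Int × Int)) (pos : PySem.Dict Int Int) (c : List Int)
    (hb : ∀ e ∈ edges, 0 ≤ pos.getD e.1 0 ∧ pos.getD e.1 0 < (c.length : Int) ∧
            0 ≤ pos.getD e.2 0 ∧ pos.getD e.2 0 < (c.length : Int))
    (i : Int) (hi0 : 0 ≤ i) :
    PySem.List.pyGetD (edges.foldl (fun c2 (uv : Int × Int) =>
        if uv.1 = uv.2 then
          PySem.List.pySetD c2 (pos.getD uv.1 0) (PySem.List.pyGetD c2 (pos.getD uv.1 0) 0 + 2)
        else if pos.getD uv.1 0 < pos.getD uv.2 0 then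
          PySem.List.pySetD c2 (pos.getD uv.1 0) (PySem.List.pyGetD c2 (pos.getD uv.1 0) 0 + 1)
        else
          PySem.List.pySetD c2 (pos.getD uv.2 0) (PySem.List.pyGetD c2 (pos.getD uv.2 0) 0 + 1)) c) i 0
      = PySem.List.pyGetD c i 0 +
          (edges.map (fun e =>
            if e.1 = e.2 then (if pos.getD e.1 0 = i then (2 : Int) else 0)
            else if pos.getD e.1 0 < pos.getD e.2 0 then (if pos.getD e.1 0 = i then 1 else 0)
            else (if pos.getD e.2 0 = i then 1 else 0))).sum := by
  induction edges generalizing c with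
  | nil => simp
  | cons e es ih =>
    obtain ⟨h1, h2, h3, h4⟩ := hb e (by simp)
    have hbs : ∀ f ∈ es, 0 ≤ pos.getD f.1 0 ∧ pos.getD f.1 0 < (c.length : Int) ∧
        0 ≤ pos.getD f.2 0 ∧ pos.getD f.2 0 < (c.length : Int) :=
      fun f hf => hb f (List.mem_cons_of_mem _ hf)
    simp only [List.foldl_cons, List.map_cons, List.sum_cons]
    by_cases g1 : e.1 = e.2
    · rw [if_pos g1, ih _ (by simpa [PySem.List.length_pySetD] using hbs),
        pv_gset _ _ _ _ _ h1 h2 hi0]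
      by_cases hp : pos.getD e.2 0 = i <;> simp [g1, hp, eq_comm] <;> omega
    · by_cases g2 : pos.getD e.1 0 < pos.getD e.2 0
      · rw [if_neg g1, if_pos g2, ih _ (by simpa [PySem.List.length_pySetD] using hbs),
          pv_gset _ _ _ _ _ h1 h2 hi0]
        by_cases hp : pos.getD e.1 0 = i <;> simp [g1, g2, hp, eq_comm] <;> omega
      · rw [if_neg g1, if_neg g2, ih _ (by simpa [PySem.List.length_pySetD] using hbs),
          pv_gset _ _ _ _ _ h3 h4 hi0]
        by_cases hp : pos.getD e.2 0 = i <;> simp [g1, g2, hp, eq_comm] <;> omega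

def pvRef (edges : List (Int × Int)) : List Int → List Int → Bool
  | _, [] => true
  | pre, w :: rest => if 1 < pvLive edges w pre then false else pvRef edges (pre ++ [w]) rest

theorem pv_all_ref (edges : List (Int × Int)) :
    ∀ (suf pre cs : List Int) (hlen : cs.length = suf.length),
      (∀ (j : Nat) (hj : j < suf.length),
        cs[j]'(by omega) = pvLive edges (suf[j]'hj) (pre ++ suf.take j)) →
      (cs.all (fun c => c ≤ 1) = pvRef edges pre suf) := by
  intro suf
  induction suf with
  | nil => intro pre cs hlen _; rw [List.length_nil, List.length_eq_zero_iff] at hlen; subst hlen; rfl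
  | cons w rest ih =>
    intro pre cs hlen hspec
    match cs, hlen with
    | c :: cs', hlen =>
      have h0 : c = pvLive edges w pre := by simpa using hspec 0 (by simp)
      simp only [List.all_cons, pvRef]
      by_cases hc : 1 < c
      · rw [← h0, if_pos hc]
        simp [show ¬ (c ≤ 1) by omega]
      · have hle : c ≤ 1 := by omega
        rw [if_neg (by omega : ¬ 1 < pvLive edges w pre)]
        simp only [hle, decide_true, Bool.true_and]
        refine ih (pre ++ [w]) cs' (by simpa using hlen) ?_
        intro j hj
        have h2 := hspec (j + 1) (by simpa using hj)
        have e1 : (pre ++ [w]) ++ rest.take j = pre ++ (w :: rest).take (j + 1) := by simp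
        rw [e1]
        simpa using h2

theorem pv_fold_none (adj : PySem.Dict Int (List Int)) (suf : List Int) :
    (suf.foldl (fun (st : Option (List Bool × List Int)) node =>
        match st with
        | none => none
        | some (removed, degree) =>
          if 1 < PySem.List.pyGetD degree node 0 then none
          else
            let removed' := PySem.List.pySetD removed node true
            let degree' := (adj.getD node []).foldl
              (fun dg nb =>
                if PySem.List.pyGetD removed' nb false then dg
                else PySem.List.pySetD dg nb (PySem.List.pyGetD dg nb 0 - 1)) degree
            some (removed', degree'))
        none) = none := by
  induction suf with
  | nil => rfl
  | cons w rest ih => simpa using ih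

theorem pv_sim_loop (edges : List (Int × Int)) (adj : PySem.Dict Int (List Int)) (N : Nat)
    (hadj : ∀ w, adj.getD w [] = pvAdjL edges w)
    (hedge : ∀ e ∈ edges, 0 ≤ e.1 ∧ e.1 < (N : Int) ∧ 0 ≤ e.2 ∧ e.2 < (N : Int)) :
    ∀ (suf pre : List Int) (rem : List Bool) (deg : List Int),
      (pre ++ suf).Nodup →
      (∀ x ∈ pre ++ suf, 0 ≤ x ∧ x < (N : Int)) →
      rem.length = N → deg.length = N →
      (∀ x : Int, 0 ≤ x → x < (N : Int) →
        PySem.List.pyGetD rem x false = decide (x ∈ pre)) →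
      (∀ x : Int, 0 ≤ x → x < (N : Int) → x ∉ pre →
        PySem.List.pyGetD deg x 0 = pvLive edges x pre) →
      (suf.foldl (fun (st : Option (List Bool × List Int)) node =>
        match st with
        | none => none
        | some (removed, degree) =>
          if 1 < PySem.List.pyGetD degree node 0 then none
          else
            let removed' := PySem.List.pySetD removed node true
            let degree' := (adj.getD node []).foldl
              (fun dg nb =>
                if PySem.List.pyGetD removed' nb false then dg
                else PySem.List.pySetD dg nb (PySem.List.pyGetD dg nb 0 - 1)) degree
            some (removed', degree'))
        (some (rem, deg))).isSome = pvRef edges pre suf := by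
  intro suf
  induction suf with
  | nil => intros; rfl
  | cons w rest ih =>
    intro pre rem deg hnd hbnd hreml hdegl hremi hdegi
    have hw : 0 ≤ w ∧ w < (N : Int) := hbnd w (by simp)
    have hwpre : w ∉ pre := by
      have h3 := (List.nodup_append.1 hnd).2.2
      intro hmem; exact h3 w hmem w (by simp) rfl
    have hdw : PySem.List.pyGetD deg w 0 = pvLive edges w pre := hdegi w hw.1 hw.2 hwpre
    simp only [List.foldl_cons]
    by_cases hgt : 1 < PySem.List.pyGetD deg w 0
    · have h2 : pvRef edges pre (w :: rest) = false := by
        rw [pvRef, if_pos (hdw ▸ hgt)]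
      rw [h2]
      simp only [if_pos hgt]
      rw [pv_fold_none]
      rfl
    · have h2 : pvRef edges pre (w :: rest) = pvRef edges (pre ++ [w]) rest := by
        rw [pvRef, if_neg (hdw ▸ hgt)]
      rw [h2]
      simp only [if_neg hgt]
      have hassoc : (pre ++ [w]) ++ rest = pre ++ w :: rest := by simp
      have hadjb : ∀ y ∈ adj.getD w [], 0 ≤ y ∧ y < ((deg.length : Nat) : Int) := by
        intro y hy
        rw [hadj] at hy
        obtain ⟨e, he, hcase⟩ := pv_adjL_mem edges w y hy
        obtain ⟨g1, g2, g3, g4⟩ := hedge e he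
        rw [hdegl]
        rcases hcase with h | h <;> subst h <;> exact ⟨by omega, by omega⟩
      refine ih (pre ++ [w]) _ _ (by rw [hassoc]; exact hnd)
        (by rw [hassoc]; exact hbnd) (by rw [PySem.List.length_pySetD]; exact hreml)
        (by rw [pv_inner_len]; exact hdegl) ?_ ?_
      · intro x hx0 hxN
        rw [pv_gset _ _ _ _ _ hw.1 (by rw [hreml]; exact hw.2) hx0]
        by_cases hxw : x = w
        · simp [hxw]
        · rw [if_neg hxw, hremi x hx0 hxN]
          simp [List.mem_append, hxw]
      · intro x hx0 hxN hxpre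
        have hxw : x ≠ w := fun h => hxpre (by simp [h])
        have hxpre' : x ∉ pre := fun h => hxpre (by simp [h])
        rw [pv_inner_spec _ _ _ hadjb x hx0,
          pv_gset _ _ _ _ _ hw.1 (by rw [hreml]; exact hw.2) hx0,
          if_neg hxw, hremi x hx0 hxN]
        have : decide (x ∈ pre) = false := by simp [hxpre']
        rw [this]
        simp only [Bool.false_eq_true, if_false]
        rw [hdegi x hx0 hxN hxpre', hadj, pv_adjL_count, pv_live_step edges x w pre hxw hwpre]

theorem pv_getD_replicate {α : Type} (nn : Nat) (a d : α) (x : Int) (hx0 : 0 ≤ x) :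
    PySem.List.pyGetD (List.replicate nn a) x d = if x < (nn : Int) then a else d := by
  rw [show x = ((x.toNat : Nat) : Int) by omega, PySem.List.pyGetD_natCast]
  by_cases h : x.toNat < nn
  · rw [List.getD_replicate _ h, if_pos (by omega)]
  · rw [if_neg (by omega)]
    simp [List.getD, h]

theorem pv_idxOf_getElem (s : List Int) (hnd : s.Nodup) (j : Nat) (hj : j < s.length) :
    s.idxOf (s[j]'hj) = j := by
  have hm : s[j]'hj ∈ s := List.getElem_mem _
  have hlt := List.idxOf_lt_length_of_mem hm
  have := List.getElem_idxOf hlt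
  exact (List.Nodup.getElem_inj_iff hnd).1 this

-- ===== VERDICT (by name: the statement is the Claim_ definition above) =====
theorem is_valid_peeling_spec : Claim_equal_is_valid_peeling := by
  unfold Claim_equal_is_valid_peeling
  intro n edges sequence _ hpre
  unfold Spec_is_valid_peeling is_valid_peeling is_valid_peeling_alt
  by_cases hlen : (sequence.length : Int) ≠ n
  · rw [if_pos hlen, if_pos hlen]
  · rw [if_neg hlen, if_neg hlen]
    rw [not_not] at hlen
    by_cases hn1 : n = 1
    · rw [if_pos hn1, if_pos hn1]
    · rw [if_neg hn1, if_neg hn1]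
      obtain ⟨hnd, hsb, heb⟩ := hpre hlen hn1
      have hNn : n.toNat = sequence.length := by omega
      rw [hNn]
      set N := sequence.length with hN
      have hedge' : ∀ e ∈ edges, 0 ≤ e.1 ∧ e.1 < (N : Int) ∧ 0 ≤ e.2 ∧ e.2 < (N : Int) := by
        intro e he; obtain ⟨g1, g2, g3, g4⟩ := heb e he; exact ⟨g1, by omega, g3, by omega⟩
      have hseq' : ∀ x ∈ sequence, 0 ≤ x ∧ x < (N : Int) := by
        intro x hx; obtain ⟨g1, g2⟩ := hsb x hx; exact ⟨g1, by omega⟩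
      have hsurj : ∀ y : Int, 0 ≤ y → y < (N : Int) → y ∈ sequence :=
        pv_surj sequence hnd hseq'
      -- ===== A side =====
      rw [PySem.List.foldl_prod_mk
        (f := fun (d : PySem.Dict Int (List Int)) (uv : Int × Int) =>
          (d.modify uv.1 [] (· ++ [uv.2])).modify uv.2 [] (· ++ [uv.1]))
        (g := fun (c2 : List Int) (uv : Int × Int) =>
          let d1 := PySem.List.pySetD c2 uv.1 (PySem.List.pyGetD c2 uv.1 0 + 1)
          PySem.List.pySetD d1 uv.2 (PySem.List.pyGetD d1 uv.2 0 + 1))]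
      rw [pv_sim_loop edges _ N (fun w => pv_adj_spec edges w) hedge' sequence [] _ _
        (by simpa using hnd) (by simpa using hseq')
        (by simp)
        (by rw [pv_deg_len]; simp)
        (by
          intro x hx0 hxN
          rw [pv_getD_replicate _ _ _ _ hx0, if_pos hxN]
          simp)
        (by
          intro x hx0 hxN _
          rw [pv_deg_spec edges _ (by simpa using hedge') x hx0,
            pv_getD_replicate _ _ _ _ hx0, if_pos hxN]
          simp)]
      -- ===== B side =====
      set pos := (PySem.List.enumerate sequence 0).foldl
        (fun (d : PySem.Dict Int Int) p => d.insert p.2 p.1) PySem.Dict.empty with hposdef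
      have hpos : ∀ x ∈ sequence, pos.getD x 0 = (sequence.idxOf x : Int) := by
        intro x hx
        rw [hposdef, pv_pos_spec sequence 0 PySem.Dict.empty x hnd, if_pos hx]
        ring
      have hposb : ∀ e ∈ edges, 0 ≤ pos.getD e.1 0 ∧ pos.getD e.1 0 < ((List.replicate N (0:Int)).length : Int) ∧
          0 ≤ pos.getD e.2 0 ∧ pos.getD e.2 0 < ((List.replicate N (0:Int)).length : Int) := by
        intro e he
        obtain ⟨g1, g2, g3, g4⟩ := hedge' e he
        have m1 := hsurj e.1 g1 g2
        have m2 := hsurj e.2 g3 g4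
        rw [hpos e.1 m1, hpos e.2 m2]
        have := List.idxOf_lt_length_of_mem m1
        have := List.idxOf_lt_length_of_mem m2
        simp only [List.length_replicate]
        refine ⟨by omega, by omega, by omega, by omega⟩
      rw [pv_all_ref edges sequence []
        (edges.foldl (fun c2 uv =>
          if uv.1 = uv.2 then
            PySem.List.pySetD c2 (pos.getD uv.1 0) (PySem.List.pyGetD c2 (pos.getD uv.1 0) 0 + 2)
          else if pos.getD uv.1 0 < pos.getD uv.2 0 then
            PySem.List.pySetD c2 (pos.getD uv.1 0) (PySem.List.pyGetD c2 (pos.getD uv.1 0) 0 + 1)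
          else
            PySem.List.pySetD c2 (pos.getD uv.2 0) (PySem.List.pyGetD c2 (pos.getD uv.2 0) 0 + 1))
          (List.replicate N (0:Int)))
        (by rw [pv_cnt_len]; simpa using hN)
        ?_]
      intro j hj
      have hjN : j < N := by simpa using hj
      have hgetj : ∀ (cs : List Int) (h : j < cs.length), cs[j]'h = PySem.List.pyGetD cs (j : Int) 0 := by
        intro cs h
        rw [PySem.List.pyGetD_natCast]
        simp [List.getD, List.getElem?_eq_getElem h]
      rw [hgetj _ (by rw [pv_cnt_len]; simpa using hjN),
        pv_cnt_spec edges pos _ hposb (j : Int) (by omega),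
        pv_getD_replicate _ _ _ _ (by omega : (0:Int) ≤ (j:Int)), if_pos (by exact_mod_cast hjN)]
      rw [zero_add]
      -- termwise equality of the two sums
      set w := sequence[j]'hj with hwdef
      have hiw : sequence.idxOf w = j := pv_idxOf_getElem sequence hnd j hj
      have hueq : ∀ u, u ∈ sequence → ((sequence.idxOf u : Int) = (j : Int) ↔ u = w) := by
        intro u hu
        constructor
        · intro h
          have hlt := List.idxOf_lt_length_of_mem hu
          have hg := List.getElem_idxOf hlt
          have : sequence.idxOf u = j := by omega
          rw [← hg, hwdef]
          congr 1
        · intro h; rw [h, hiw]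
      have hmemtk : ∀ u, u ∈ sequence → (u ∉ sequence.take j ↔ ¬ sequence.idxOf u < j) := by
        intro u hu; exact not_congr (pv_mem_take sequence u j hu hnd)
      rw [pvLive]
      refine congrArg List.sum (List.map_congr_left ?_)
      intro e he
      obtain ⟨g1, g2, g3, g4⟩ := hedge' e he
      have m1 := hsurj e.1 g1 g2
      have m2 := hsurj e.2 g3 g4
      rw [hpos e.1 m1, hpos e.2 m2]
      simp only [List.nil_append]
      by_cases hself : e.1 = e.2
      · rw [if_pos hself]
        by_cases haw : e.1 = w
        · have h1 : (sequence.idxOf e.1 : Int) = (j:Int) := (hueq e.1 m1).2 haw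
          have h2 : e.1 ∉ sequence.take j := (hmemtk e.1 m1).2 (by omega)
          rw [if_pos h1]
          rw [if_pos ⟨haw, hself ▸ h2⟩, if_pos ⟨hself ▸ haw, h2⟩]
          norm_num
        · have h1 : ¬ (sequence.idxOf e.1 : Int) = (j:Int) := fun h => haw ((hueq e.1 m1).1 h)
          rw [if_neg h1, if_neg (fun hc => haw hc.1), if_neg (fun hc => haw (hself ▸ hc.1 : e.1 = w))]
          norm_num
      · rw [if_neg hself]
        have hne : sequence.idxOf e.1 ≠ sequence.idxOf e.2 := by
          intro h
          apply hself
          have hl1 := List.idxOf_lt_length_of_mem m1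
          have hg1 := List.getElem_idxOf hl1
          have hg2 := List.getElem_idxOf (List.idxOf_lt_length_of_mem m2)
          rw [← hg1, ← hg2]
          congr 1
        by_cases hlt : (sequence.idxOf e.1 : Int) < (sequence.idxOf e.2 : Int)
        · rw [if_pos hlt]
          by_cases haw : e.1 = w
          · have h1 : (sequence.idxOf e.1 : Int) = (j:Int) := (hueq e.1 m1).2 haw
            have hbw : e.2 ≠ w := fun h => hself (h ▸ haw : e.1 = e.2)
            have h2 : e.2 ∉ sequence.take j := (hmemtk e.2 m2).2 (by omega)
            rw [if_pos h1, if_pos ⟨haw, h2⟩, if_neg (fun hc => hbw hc.1)]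
            norm_num
          · have h1 : ¬ (sequence.idxOf e.1 : Int) = (j:Int) := fun h => haw ((hueq e.1 m1).1 h)
            rw [if_neg h1, if_neg (fun hc => haw hc.1)]
            by_cases hbw : e.2 = w
            · have h2 : (sequence.idxOf e.2 : Int) = (j:Int) := (hueq e.2 m2).2 hbw
              have h3 : e.1 ∈ sequence.take j := by
                rw [pv_mem_take sequence e.1 j m1 hnd]; omega
              rw [if_neg (fun hc => hc.2 h3)]
              norm_num
            · rw [if_neg (fun hc => hbw hc.1)]
              norm_num
        · rw [if_neg hlt]
          by_cases hbw : e.2 = w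
          · have h1 : (sequence.idxOf e.2 : Int) = (j:Int) := (hueq e.2 m2).2 hbw
            have haw : e.1 ≠ w := fun h => hself (h.trans hbw.symm)
            have h2 : e.1 ∉ sequence.take j := (hmemtk e.1 m1).2 (by omega)
            rw [if_pos h1, if_neg (fun hc => haw hc.1), if_pos ⟨hbw, h2⟩]
            norm_num
          · have h1 : ¬ (sequence.idxOf e.2 : Int) = (j:Int) := fun h => hbw ((hueq e.2 m2).1 h)
            rw [if_neg h1]
            by_cases haw : e.1 = w
            · have h2 : (sequence.idxOf e.1 : Int) = (j:Int) := (hueq e.1 m1).2 haw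
              have h3 : e.2 ∈ sequence.take j := by
                rw [pv_mem_take sequence e.2 j m2 hnd]; omega
              rw [if_neg (fun hc => hc.2 h3), if_neg (fun hc => hbw hc.1)]
              norm_num
            · rw [if_neg (fun hc => haw hc.1), if_neg (fun hc => hbw hc.1)]
              norm_num
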